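-- pv_equiv track=rewrite | github.com/kripsaar/AdventOfCode | 2023/13-12/part_one.py | validate_mirror
-- ===== SOURCE A (Python) =====
-- def validate_mirror(lines: list[str], candidate: int):
--     for offset in range(len(lines) - candidate):
--         mirror_offset = -offset - 1
--         if candidate + mirror_offset < 0:
--             return True
--         if lines[candidate + offset] != lines[candidate + mirror_offset]:
--             return False
--     return True
-- ===== SOURCE B (Python) =====
-- def validate_mirror(lines: list[str], candidate: int):
--     if candidate < 1:
--         return True
--     n = min(candidate, len(lines) - candidate)
--     window = lines[candidate - n : candidate + n]
--     return window == list(reversed(window))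
-- ===== Notes on version B (the rewrite author's own statement) =====
-- stated objective: alternative
-- what changed: Instead of A's loop generating two symmetric indices per offset, B extracts the symmetric window of length 2*min(candidate, len-candidate) centred on the split and tests it for being a palindrome by a single wholesale comparison with its reversal (with the immediate-True guard for candidate < 1, which is also A's behaviour there).
import Mathlib
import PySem

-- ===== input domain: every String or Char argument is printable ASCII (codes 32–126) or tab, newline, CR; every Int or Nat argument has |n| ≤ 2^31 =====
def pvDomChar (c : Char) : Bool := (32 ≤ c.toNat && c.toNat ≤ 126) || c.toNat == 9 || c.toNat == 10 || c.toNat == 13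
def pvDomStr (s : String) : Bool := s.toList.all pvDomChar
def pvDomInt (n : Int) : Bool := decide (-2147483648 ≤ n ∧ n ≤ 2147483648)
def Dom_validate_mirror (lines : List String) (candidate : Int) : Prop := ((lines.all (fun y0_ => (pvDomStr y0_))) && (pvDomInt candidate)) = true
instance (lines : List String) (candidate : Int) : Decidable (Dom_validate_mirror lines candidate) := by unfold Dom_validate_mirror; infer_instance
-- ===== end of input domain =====

-- B extracts the symmetric window of length 2*min(candidate, len-candidate) centred on the
-- split and tests it for being a palindrome by one wholesale comparison with its reversal,
-- instead of A's offset loop with two symmetric indices; objective: alternative.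

-- ===== PORT A =====
-- the 'for offset in range(len(lines) - candidate)' loop with its two early returns;
-- 'range' is iterated lazily as in Python: 'remaining' counts the iterations left, 'offset' is the loop variable
def validate_mirror_loop (lines : List String) (candidate : Int) : Nat → Int → Bool
  | 0, _ => true
  | remaining + 1, offset =>
    let mirror_offset := -offset - 1
    if candidate + mirror_offset < 0 then true
    else if PySem.List.pyGet? lines (candidate + offset) ≠ PySem.List.pyGet? lines (candidate + mirror_offset) then false
    else validate_mirror_loop lines candidate remaining (offset + 1)

def validate_mirror (lines : List String) (candidate : Int) : Bool :=
  validate_mirror_loop lines candidate ((lines.length : Int) - candidate).toNat 0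

-- ===== PORT B =====
-- 'list(reversed(window))' is ported as List.reverse (the library call it corresponds to)
def validate_mirror_alt (lines : List String) (candidate : Int) : Bool :=
  if candidate < 1 then true
  else
    let n := min candidate ((lines.length : Int) - candidate)
    let window := PySem.List.slice lines (some (candidate - n)) (some (candidate + n))
    window == window.reverse

-- ===== PRECONDITION & SPEC =====
def Spec_validate_mirror (lines : List String) (candidate : Int) (out : Bool) : Prop := out = validate_mirror_alt lines candidate
instance (lines : List String) (candidate : Int) (out : Bool) : Decidable (Spec_validate_mirror lines candidate out) := by unfold Spec_validate_mirror; infer_instance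

-- ===== CLAIM (what is proved, stated in full; the proofs are below) =====
def Claim_equal_validate_mirror : Prop := ∀ (lines : List String) (candidate : Int), Dom_validate_mirror lines candidate → Spec_validate_mirror lines candidate (validate_mirror lines candidate)

-- ===== LEMMAS AND PROOFS =====

-- shared characterisation of both programs: lines mirror around c at every overlap position ≥ j
def MirrorFrom (l : List String) (c j : Nat) : Prop :=
  ∀ k, j ≤ k → k < min c (l.length - c) → l[c + k]? = l[c - 1 - k]?

lemma loop_iff_mirrorFrom (l : List String) (c : Nat) :
    ∀ j : Nat, (validate_mirror_loop l (c : Int) (l.length - (c + j)) (j : Int) = true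
      ↔ MirrorFrom l c j) := by
  intro j
  induction hn : l.length - (c + j) generalizing j with
  | zero =>
    have hm : MirrorFrom l c j := by intro k hk1 hk2; omega
    simp [validate_mirror_loop, hm]
  | succ m ih =>
    simp only [validate_mirror_loop]
    by_cases hcj : c ≤ j
    · have hg : (c : Int) + (-(j : Int) - 1) < 0 := by omega
      have hm : MirrorFrom l c j := by intro k hk1 hk2; omega
      simp [hg, hm]
    · have hg : ¬ ((c : Int) + (-(j : Int) - 1) < 0) := by omega
      have e1 : (c : Int) + (j : Int) = ((c + j : Nat) : Int) := by push_cast; ring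
      have e2 : (c : Int) + (-(j : Int) - 1) = ((c - 1 - j : Nat) : Int) := by omega
      rw [if_neg hg, e1, e2, PySem.List.pyGet?_natCast, PySem.List.pyGet?_natCast]
      by_cases heq : l[c + j]? = l[c - 1 - j]?
      · rw [if_neg (by simpa using heq)]
        rw [show ((j : Int) + 1) = ((j + 1 : Nat) : Int) by push_cast; ring,
          ih (j + 1) (by omega)]
        constructor
        · intro hm k hk1 hk2
          rcases Nat.eq_or_lt_of_le hk1 with h | h
          · subst h; exact heq
          · exact hm k (by omega) hk2
        · intro hm k hk1 hk2; exact hm k (by omega) hk2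
      · rw [if_pos (by simpa using heq)]
        have hnm : ¬ MirrorFrom l c j := fun hm => heq (hm j (le_refl j) (by omega))
        simp [hnm]

-- the window: for 1 ≤ c ≤ L, with m = min c (L - c), B's slice is (l.drop (c-m)).take (2m)
lemma alt_iff_mirrorFrom (l : List String) (c : Nat) (hc : 1 ≤ c) (hcl : c ≤ l.length) :
    validate_mirror_alt l (c : Int) = true ↔ MirrorFrom l c 0 := by
  have hg : ¬ ((c : Int) < 1) := by omega
  set L := l.length with hL
  set m : Nat := min c (L - c) with hm
  have hn : min (c : Int) ((L : Int) - (c : Int)) = ((m : Nat) : Int) := by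
    simp only [hm]; omega
  have e1 : (c : Int) - min (c : Int) ((L : Int) - (c : Int)) = ((c - m : Nat) : Int) := by
    rw [hn]; omega
  have e2 : (c : Int) + min (c : Int) ((L : Int) - (c : Int)) = ((c + m : Nat) : Int) := by
    rw [hn]; omega
  simp only [validate_mirror_alt, if_neg hg, ← hL, e1, e2, PySem.List.slice_natCast]
  have hwl : ((l.drop (c - m)).take (c + m - (c - m))).length = 2 * m := by
    simp [List.length_take, List.length_drop]; omega
  set w : List String := (l.drop (c - m)).take (c + m - (c - m)) with hw
  have hget : ∀ i, i < 2 * m → w[i]? = l[c - m + i]? := by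
    intro i hi
    rw [hw, List.getElem?_take, if_pos (by omega), List.getElem?_drop]
  constructor
  · intro hpal k _ hk
    have hpal' : w = w.reverse := by simpa using hpal
    have hkm : k < m := by simpa [hm] using hk
    have h1 : w[m + k]? = w.reverse[m + k]? := by rw [← hpal']
    rw [List.getElem?_reverse (by omega), hwl, hget (m + k) (by omega),
      hget (2 * m - 1 - (m + k)) (by omega),
      show c - m + (m + k) = c + k from by omega,
      show c - m + (2 * m - 1 - (m + k)) = c - 1 - k from by omega] at h1
    exact h1
  · intro hmir
    have key : ∀ i, i < 2 * m → l[c - m + i]? = l[c + m - 1 - i]? := by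
      intro i hi
      by_cases him : m ≤ i
      · have hk := hmir (i - m) (by omega) (by simp [hm]; omega)
        rw [show c - m + i = c + (i - m) from by omega,
          show c + m - 1 - i = c - 1 - (i - m) from by omega]
        exact hk
      · have hk := hmir (m - 1 - i) (by omega) (by simp [hm]; omega)
        rw [show c - m + i = c - 1 - (m - 1 - i) from by omega,
          show c + m - 1 - i = c + (m - 1 - i) from by omega]
        exact hk.symm
    have hpal : w = w.reverse := by
      apply List.ext_getElem?
      intro i
      by_cases hi : i < 2 * m
      · rw [List.getElem?_reverse (by omega), hwl, hget i hi,
          hget (2 * m - 1 - i) (by omega),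
          show c - m + (2 * m - 1 - i) = c + m - 1 - i from by omega]
        exact key i hi
      · rw [List.getElem?_eq_none (by omega), List.getElem?_eq_none (by simp; omega)]
    simpa using hpal

lemma a_true_of_lt_one (l : List String) (candidate : Int) (h : candidate < 1) :
    validate_mirror l candidate = true := by
  unfold validate_mirror
  cases hf : ((l.length : Int) - candidate).toNat with
  | zero => rfl
  | succ n =>
    simp [validate_mirror_loop]
    exact Or.inl (by omega)

-- ===== VERDICT (by name: the statement is the Claim_ definition above) =====
theorem validate_mirror_spec : Claim_equal_validate_mirror := by
  intro lines candidate _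
  unfold Spec_validate_mirror
  by_cases h : candidate < 1
  · rw [a_true_of_lt_one lines candidate h]
    simp [validate_mirror_alt, h]
  · have h0 : 0 ≤ candidate := by omega
    have hc : candidate = ((candidate.toNat : Nat) : Int) := (Int.toNat_of_nonneg h0).symm
    set c : Nat := candidate.toNat with hcdef
    by_cases hbig : lines.length < c
    · -- candidate past the end: A's range is empty, B's window is empty
      have hA : validate_mirror lines candidate = true := by
        unfold validate_mirror
        have : ((lines.length : Int) - candidate).toNat = 0 := by omega
        rw [this]; rfl
      have hB : validate_mirror_alt lines candidate = true := by
        have hn : min candidate ((lines.length : Int) - candidate)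
            = (lines.length : Int) - candidate := by omega
        simp only [validate_mirror_alt, if_neg (show ¬ candidate < 1 by omega), hn]
        have ha : (0 : Int) ≤ candidate - ((lines.length : Int) - candidate) := by omega
        have hb : (0 : Int) ≤ candidate + ((lines.length : Int) - candidate) := by omega
        rw [PySem.List.slice_toNat lines ha hb]
        have : lines.length ≤ (candidate - ((lines.length : Int) - candidate)).toNat := by omega
        rw [List.drop_eq_nil_of_le this]
        simp
      rw [hA, hB]
    · rw [hc, validate_mirror]
      have hA := loop_iff_mirrorFrom lines c 0
      simp only [Nat.cast_zero, Nat.add_zero] at hA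
      have hf : (((lines.length : Int)) - ((c : Nat) : Int)).toNat = lines.length - c := by
        omega
      rw [hf]
      exact Bool.eq_iff_iff.mpr
        (hA.trans (alt_iff_mirrorFrom lines c (by omega) (by omega)).symm)
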